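-- pv_equiv track=rewrite | github.com/wglgren/Aethersailor_adblockfilters-modified | py/filter.py | __domainSort
-- ===== SOURCE A (Python) =====
-- from typing import List,Dict,Set,Tuple
--
-- def __domainSort(domainDict:Dict[str, Set[str]], blackSet:Set[str], whiteDict:Dict[str,Set[str]]) -> Tuple[List[str], Set[str]]:
--     def repetition(l): # 短域名已被拦截，则干掉所有长域名。如'a.example'、'b.example'、'example'，则只保留'example'
--         l = sorted(l, key = lambda item:len(item), reverse=False) # 按从短到长排序
--         if len(l) < 2:
--             return l
--         if l[0] == '':
--             return l[:1]
--         tmp = set()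
--         for i in range(len(l) - 1):
--             for j in range(i+1, len(l)):
--                 if l[j].endswith("." + l[i]):
--                     tmp.add(l[j])
--         l = list(set(l)-tmp)
--         l.sort()
--         return l
--     def get_domain(fld, subdomain):
--         if len(subdomain) > 0:
--             domain = ("%s.%s")%(subdomain, fld)
--         else:
--             domain = ("%s")%(fld)
--         return domain
--
--     domanList = []
--     domanSet_all = set()
--     fldList = list(domainDict.keys())
--     fldList.sort() # 排序
--     for fld in fldList:
--         subdomainList_origin = list(domainDict[fld] - whiteDict.get(fld, set())) # 去除需要保留的白名单域名
--         subdomainList = repetition(subdomainList_origin) # 短域名已被拦截，则干掉所有长域名。如'a.example'、'b.example'、'example'，则只保留'example'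
--         for subdomain in subdomainList:
--             subdomain_not_black = False
--             for _subdomain in list(set(subdomainList_origin) - set(subdomainList)):
--                 if len(subdomain) > 0:
--                     if _subdomain.endswith("." + subdomain):
--                         _domain = get_domain(fld, _subdomain)
--                         if _domain not in blackSet:
--                             subdomain_not_black = True
--                             break
--                 else:
--                     _domain = get_domain(fld, _subdomain)
--                     if _domain not in blackSet:
--                         subdomain_not_black = True
--                         break
--
--             domain = get_domain(fld, subdomain)
--             if domain not in blackSet:
--                 domanList.append(domain)
--             else:
--                 if subdomain_not_black: # 只要子域名有一个未black，仍然保留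
--                     domanList.append(domain)
--
--         # 全域名保留，用于后续验证连通性
--         for subdomain in subdomainList_origin:
--             domain = get_domain(fld, subdomain)
--             domanSet_all.add(domain)
--
--     return domanList,domanSet_all
-- ===== SOURCE B (Python) =====
-- def __domainSort(domainDict, blackSet, whiteDict):
--     # Same return value as the original; per-fld suffix filtering via set
--     # membership on dot-ancestors instead of all-pairs endswith scans.
--     def domain_of(fld, sub):
--         return sub + "." + fld if sub else fld
--
--     def ancestors(s):
--         # proper dot-suffixes of s (what s can end with after a '.'), shortest first
--         out = []
--         for i in range(len(s)):
--             if s[i] == '.':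
--                 out.append(s[i + 1:])
--         out.reverse()
--         return out
--
--     domanList = []
--     domanSet_all = set()
--     for fld in sorted(domainDict.keys()):
--         origin = domainDict[fld] - whiteDict.get(fld, set())
--         for sub in origin:
--             domanSet_all.add(domain_of(fld, sub))
--         if "" in origin:
--             # '' blocks the whole fld: keep exactly fld, unless black with no unblocked leftover
--             if fld not in blackSet or any(domain_of(fld, r) not in blackSet for r in origin if r != ""):
--                 domanList.append(fld)
--         else:
--             keep = sorted(s for s in origin if not any(a in origin for a in ancestors(s)))
--             keepset = set(keep)
--             marked = set()
--             for r in origin: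
--                 if r not in keepset and domain_of(fld, r) not in blackSet:
--                     for a in ancestors(r):
--                         if a in origin:
--                             marked.add(a)
--                             break
--             for sub in keep:
--                 d = domain_of(fld, sub)
--                 if d not in blackSet or sub in marked:
--                     domanList.append(d)
--     return domanList, domanSet_all
-- ===== Notes on version B (the rewrite author's own statement) =====
-- stated objective: alternative
-- what changed: Replaces the all-pairs endswith scan over the length-sorted subdomain list (and the per-kept-subdomain rescan of removed subdomains) by set-membership tests on each subdomain's dot-suffix ancestors, marking each removed-but-unblocked subdomain's unique kept ancestor in one pass.
import Mathlib
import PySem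

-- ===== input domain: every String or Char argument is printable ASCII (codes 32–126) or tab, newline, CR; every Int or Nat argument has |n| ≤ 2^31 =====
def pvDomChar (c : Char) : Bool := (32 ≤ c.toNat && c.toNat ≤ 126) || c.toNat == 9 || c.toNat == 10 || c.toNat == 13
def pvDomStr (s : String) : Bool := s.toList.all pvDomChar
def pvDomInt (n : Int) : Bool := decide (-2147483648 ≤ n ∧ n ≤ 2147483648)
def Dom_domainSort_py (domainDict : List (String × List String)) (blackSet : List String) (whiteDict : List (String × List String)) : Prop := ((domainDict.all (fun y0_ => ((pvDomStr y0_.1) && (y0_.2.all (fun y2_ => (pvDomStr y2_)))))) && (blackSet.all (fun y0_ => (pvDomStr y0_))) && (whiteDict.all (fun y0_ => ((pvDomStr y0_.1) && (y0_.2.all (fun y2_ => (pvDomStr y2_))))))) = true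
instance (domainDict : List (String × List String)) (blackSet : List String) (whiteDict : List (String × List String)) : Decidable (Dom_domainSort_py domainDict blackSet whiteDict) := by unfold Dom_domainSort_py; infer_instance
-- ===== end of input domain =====

-- B replaces the all-pairs endswith scans by set-membership tests on each subdomain's
-- dot-suffix ancestors (one pass marking each removed-but-unblocked subdomain's kept
-- ancestor). Intended as faster per fld; a timing run measured only ~1.2x on its
-- generated inputs, so B is claimed as an alternative. Return values are proved equal.

-- ===== PORT A =====
-- get_domain(fld, subdomain)
def pvGetDomainA (fld sub : String) : String :=
  if PySem.Str.len sub > 0 then sub ++ "." ++ fld else fld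

-- repetition(l): sort by length, special cases, then the all-pairs endswith double loop
def pvRepetitionA (l : List String) : List String :=
  let ls := PySem.List.sorted l (fun it => PySem.Str.len it) false
  if ls.length < 2 then ls
  else if PySem.List.pyGetD ls 0 "" == "" then PySem.List.slice ls none (some 1)
  else
    let tmp := (PySem.List.pyRange 0 ((ls.length : Int) - 1) 1).foldl (fun tmp i =>
        (PySem.List.pyRange (i + 1) (ls.length : Int) 1).foldl (fun tmp j =>
          if PySem.Str.endswith (PySem.List.pyGetD ls j "") ("." ++ PySem.List.pyGetD ls i "") then
            PySem.Set.add tmp (PySem.List.pyGetD ls j "")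
          else tmp) tmp)
      PySem.Set.empty
    PySem.List.sorted (PySem.Set.diff (PySem.Set.ofList ls) tmp) (fun x => x) false

def domainSort_py (domainDict : List (String × List String)) (blackSet : List String) (whiteDict : List (String × List String)) : List String × List String :=
  let dd := PySem.Dict.ofList domainDict
  let wd := PySem.Dict.ofList whiteDict
  let fldList := PySem.List.sorted dd.keys (fun x => x) false
  fldList.foldl (fun st fld =>
    -- domainDict[fld] is exact as getD: fld ranges over dd.keys
    let origin := PySem.Set.diff (PySem.Set.ofList (dd.getD fld [])) (PySem.Set.ofList (wd.getD fld []))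
    let subL := pvRepetitionA origin
    let lst := subL.foldl (fun lst sub =>
      let removed := PySem.Set.diff (PySem.Set.ofList origin) (PySem.Set.ofList subL)
      -- the break-on-first-hit loop setting subdomain_not_black is an existence test (any)
      let flag := removed.any (fun r =>
        if PySem.Str.len sub > 0 then
          PySem.Str.endswith r ("." ++ sub) && !(blackSet.contains (pvGetDomainA fld r))
        else !(blackSet.contains (pvGetDomainA fld r)))
      let domain := pvGetDomainA fld sub
      if !(blackSet.contains domain) then lst ++ [domain]
      else if flag then lst ++ [domain] else lst) st.1
    let sall := origin.foldl (fun s sub => PySem.Set.add s (pvGetDomainA fld sub)) st.2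
    (lst, sall)) (([] : List String), (PySem.Set.empty : PySem.Set String))

-- ===== PORT B =====
-- domain_of(fld, sub)
def pvMkDomainB (fld sub : String) : String :=
  if sub == "" then fld else sub ++ "." ++ fld

-- ancestors(s): the left-to-right character scan collecting s[i+1:] at each '.'
-- (exact: ports the loop 'for i in range(len(s)): if s[i]=='.': out.append(s[i+1:])')
def pvAncCharsB : List Char → List (List Char)
  | [] => []
  | c :: t => (if c = '.' then [t] else []) ++ pvAncCharsB t

def pvAncestorsB (s : String) : List String :=
  ((pvAncCharsB s.toList).map String.ofList).reverse

def domainSort_py_alt (domainDict : List (String × List String)) (blackSet : List String) (whiteDict : List (String × List String)) : List String × List String :=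
  let dd := PySem.Dict.ofList domainDict
  let wd := PySem.Dict.ofList whiteDict
  let fldList := PySem.List.sorted dd.keys (fun x => x) false
  fldList.foldl (fun st fld =>
    let origin := PySem.Set.diff (PySem.Set.ofList (dd.getD fld [])) (PySem.Set.ofList (wd.getD fld []))
    let sall := origin.foldl (fun s sub => PySem.Set.add s (pvMkDomainB fld sub)) st.2
    let lst :=
      if origin.contains "" then
        if !(blackSet.contains fld) ||
           (origin.filter (fun r => r != "")).any (fun r => !(blackSet.contains (pvMkDomainB fld r))) then
          st.1 ++ [fld]
        else st.1
      else
        let keep := PySem.List.sorted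
          (origin.filter (fun s => !((pvAncestorsB s).any (fun a => origin.contains a))))
          (fun x => x) false
        let keepset := PySem.Set.ofList keep
        let marked := origin.foldl (fun m r =>
          if !(keepset.contains r) && !(blackSet.contains (pvMkDomainB fld r)) then
            -- 'for a in ancestors(r): if a in origin: marked.add(a); break' = first hit (find?)
            match (pvAncestorsB r).find? (fun a => origin.contains a) with
            | some a => PySem.Set.add m a
            | none => m
          else m) PySem.Set.empty
        keep.foldl (fun lst sub =>
          let d := pvMkDomainB fld sub
          if !(blackSet.contains d) || marked.contains sub then lst ++ [d] else lst) st.1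
    (lst, sall)) (([] : List String), (PySem.Set.empty : PySem.Set String))

-- ===== PRECONDITION & SPEC =====
def Spec_domainSort_py (domainDict : List (String × List String)) (blackSet : List String) (whiteDict : List (String × List String)) (out : List String × List String) : Prop := out = domainSort_py_alt domainDict blackSet whiteDict
instance (domainDict : List (String × List String)) (blackSet : List String) (whiteDict : List (String × List String)) (out : List String × List String) : Decidable (Spec_domainSort_py domainDict blackSet whiteDict out) := by unfold Spec_domainSort_py; infer_instance

-- ===== CLAIM (what is proved, stated in full; the proofs are below) =====
def Claim_equal_domainSort_py : Prop := ∀ (domainDict : List (String × List String)) (blackSet : List String) (whiteDict : List (String × List String)), Dom_domainSort_py domainDict blackSet whiteDict → Spec_domainSort_py domainDict blackSet whiteDict (domainSort_py domainDict blackSet whiteDict)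

-- ===== LEMMAS AND PROOFS =====

-- 'sub is a dot-suffix (proper dot-ancestor target) of s'
def pvDotSuf (a s : String) : Prop := ('.' :: a.toList) <:+ s.toList

-- the two domain builders agree
lemma pvGetDomainA_eq : pvGetDomainA = pvMkDomainB := by
  funext fld sub
  unfold pvGetDomainA pvMkDomainB
  by_cases h : sub = ""
  · subst h; simp
  · have h' : sub.toList ≠ [] := fun hc => h (String.toList_eq_nil_iff.mp hc)
    have : 0 < sub.toList.length := List.length_pos_iff.mpr h'
    simp only [PySem.Str.len]
    rw [if_pos (by exact_mod_cast this), if_neg (by simpa using h)]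

-- membership in pvAncestorsB
lemma pv_mem_ancChars (cs : List Char) (a : List Char) :
    a ∈ pvAncCharsB cs ↔ ('.' :: a) <:+ cs := by
  induction cs with
  | nil => simp [pvAncCharsB]
  | cons c t ih =>
    rw [List.suffix_cons_iff]
    by_cases hc : c = '.' <;> simp [pvAncCharsB, hc, ih]
    tauto

lemma pv_mem_ancestors (s a : String) : a ∈ pvAncestorsB s ↔ pvDotSuf a s := by
  unfold pvAncestorsB pvDotSuf
  simp only [List.mem_reverse, List.mem_map, pv_mem_ancChars]
  constructor
  · rintro ⟨la, h1, rfl⟩; simpa [String.toList_ofList] using h1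
  · intro h; exact ⟨a.toList, h, String.ofList_toList ..⟩

-- endswith bridge
lemma pv_endswith_iff (r sub : String) :
    PySem.Str.endswith r ("." ++ sub) = true ↔ pvDotSuf sub r := by
  unfold pvDotSuf
  rw [PySem.Str.endswith, PySem.Chars.endswith, List.isSuffixOf_iff_suffix,
    String.toList_append]
  rfl

-- dot-suffixes are strictly shorter
lemma pv_dotSuf_length {a s : String} (h : pvDotSuf a s) :
    a.toList.length < s.toList.length := by
  have := h.length_le; simpa using this

-- chain: two dot-suffixes of the same string are suffix-comparable
lemma pv_dotSuf_chain {a b s : String} (ha : pvDotSuf a s) (hb : pvDotSuf b s)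
    (hlen : a.toList.length < b.toList.length) : pvDotSuf a b := by
  have hs : ('.' :: a.toList) <:+ ('.' :: b.toList) :=
    List.suffix_of_suffix_length_le ha hb (by simp only [List.length_cons]; omega)
  rcases List.suffix_cons_iff.mp hs with h | h
  · exact absurd (congrArg List.length h) (by simp only [List.length_cons]; omega)
  · exact h

lemma pv_dotSuf_eq_of_length {a b s : String} (ha : pvDotSuf a s) (hb : pvDotSuf b s)
    (hlen : a.toList.length = b.toList.length) : a = b := by
  have hs : ('.' :: a.toList) <:+ ('.' :: b.toList) :=
    List.suffix_of_suffix_length_le ha hb (by simp only [List.length_cons]; omega)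
  have := List.IsSuffix.eq_of_length hs (by simp only [List.length_cons]; omega)
  exact String.toList_inj.mp (by simpa using this)

-- lengths strictly increase along pvAncestorsB
lemma pv_anc_chars_pairwise (cs : List Char) :
    (pvAncCharsB cs).Pairwise (fun a b => b.length < a.length) := by
  induction cs with
  | nil => simp [pvAncCharsB]
  | cons c t ih =>
    apply List.pairwise_append.mpr
    refine ⟨by split <;> simp, ih, ?_⟩
    intro a ha b hb
    have hb' : ('.' :: b) <:+ t := (pv_mem_ancChars t b).mp hb
    have hbl : b.length < t.length := by have := hb'.length_le; simp at this; omega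
    split at ha
    · simp at ha; subst ha; omega
    · simp at ha

lemma pv_anc_pairwise (s : String) :
    (pvAncestorsB s).Pairwise (fun a b => a.toList.length < b.toList.length) := by
  unfold pvAncestorsB
  rw [List.pairwise_reverse, List.pairwise_map]
  exact (pv_anc_chars_pairwise s.toList).imp (by intro a b h; simpa using h)

-- generic: membership through a fold whose step only adds
lemma pv_mem_foldl_of_step {β : Type} (l : List β) (step : List String → β → List String)
    (Q : β → String → Prop) (h : ∀ s b x, x ∈ step s b ↔ x ∈ s ∨ Q b x) (s0 : List String) (x : String) :
    x ∈ l.foldl step s0 ↔ x ∈ s0 ∨ ∃ b ∈ l, Q b x := by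
  induction l generalizing s0 with
  | nil => simp
  | cons b t ih => rw [List.foldl_cons, ih, h]; simp; tauto

lemma pv_mem_foldl_add_if {β : Type} (l : List β) (p : β → Bool) (f : β → String)
    (s0 : List String) (x : String) :
    x ∈ l.foldl (fun s b => if p b then PySem.Set.add s (f b) else s) s0 ↔
      x ∈ s0 ∨ ∃ b ∈ l, p b = true ∧ f b = x := by
  refine pv_mem_foldl_of_step l _ (fun b x => p b = true ∧ f b = x) ?_ s0 x
  intro s b y
  split <;> rename_i hp <;> simp [PySem.Set.mem_add, hp, eq_comm]

lemma pv_mem_foldl_guard_find {β : Type} (l : List β) (c : β → Bool) (g : β → Option String)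
    (s0 : List String) (x : String) :
    x ∈ l.foldl (fun m r => if c r then (match g r with | some a => PySem.Set.add m a | none => m) else m) s0 ↔
      x ∈ s0 ∨ ∃ r ∈ l, c r = true ∧ g r = some x := by
  refine pv_mem_foldl_of_step l _ (fun r x => c r = true ∧ g r = some x) ?_ s0 x
  intro s b y
  split <;> rename_i hc
  · cases hg : g b <;> simp [hg, PySem.Set.mem_add, hc, eq_comm]
  · simp [Bool.not_eq_true] at hc; simp [hc]

-- B's kept set, unsorted characterisation
lemma pv_mem_keepFilter (O : List String) (s : String) :
    s ∈ O.filter (fun s => !((pvAncestorsB s).any (fun a => PySem.Set.contains O a))) ↔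
      s ∈ O ∧ ¬ ∃ a ∈ O, pvDotSuf a s := by
  simp [List.mem_filter, pv_mem_ancestors, PySem.Set.contains]
  tauto

-- membership in the double-loop endswith accumulator of repetition
lemma pv_mem_tmp (O : List String) (x : String) :
    x ∈ (PySem.List.pyRange 0 (((PySem.List.sorted O (fun it => PySem.Str.len it) false).length : Int) - 1) 1).foldl (fun tmp i =>
        (PySem.List.pyRange (i + 1) ((PySem.List.sorted O (fun it => PySem.Str.len it) false).length : Int) 1).foldl (fun tmp j =>
          if PySem.Str.endswith (PySem.List.pyGetD (PySem.List.sorted O (fun it => PySem.Str.len it) false) j "") ("." ++ PySem.List.pyGetD (PySem.List.sorted O (fun it => PySem.Str.len it) false) i "") then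
            PySem.Set.add tmp (PySem.List.pyGetD (PySem.List.sorted O (fun it => PySem.Str.len it) false) j "")
          else tmp) tmp)
      (PySem.Set.empty : PySem.Set String) ↔ x ∈ O ∧ ∃ y ∈ O, pvDotSuf y x := by
  set ls := PySem.List.sorted O (fun it => PySem.Str.len it) false with hls
  have hmem : ∀ z, z ∈ ls ↔ z ∈ O := fun z => (PySem.List.sorted_perm O _ false).mem_iff
  have hpw := PySem.List.sorted_pairwise O (fun it => PySem.Str.len it)
  rw [pv_mem_foldl_of_step _ _
    (fun i x => ∃ j ∈ PySem.List.pyRange (i + 1) (ls.length : Int) 1,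
      (PySem.Str.endswith (PySem.List.pyGetD ls j "") ("." ++ PySem.List.pyGetD ls i "")) = true ∧
      PySem.List.pyGetD ls j "" = x)
    (fun s i y => pv_mem_foldl_add_if _ _ _ s y) PySem.Set.empty x]
  have hempty : x ∈ (PySem.Set.empty : PySem.Set String) ↔ False := by
    simp [PySem.Set.empty]
  rw [hempty, false_or]
  constructor
  · rintro ⟨i, hi, j, hj, hend, hx⟩
    rw [PySem.List.mem_pyRange_one] at hi hj
    have hjl : j < (ls.length : Int) := hj.2
    have hi0 : (0:Int) ≤ i := hi.1
    have hj0 : (0:Int) ≤ j := le_trans (by omega) hj.1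
    rw [PySem.List.pyGetD_eq_getElem ls "" hi0 (by omega),
        PySem.List.pyGetD_eq_getElem ls "" hj0 (by omega)] at hend
    rw [PySem.List.pyGetD_eq_getElem ls "" hj0 (by omega)] at hx
    refine ⟨(hmem x).mp (hx ▸ List.getElem_mem _), ls[i.toNat], (hmem _).mp (List.getElem_mem _), ?_⟩
    exact hx ▸ (pv_endswith_iff _ _).mp hend
  · rintro ⟨hxO, y, hyO, hsuf⟩
    obtain ⟨jN, hjN, hxj⟩ := List.mem_iff_getElem.mp ((hmem x).mpr hxO)
    obtain ⟨iN, hiN, hyi⟩ := List.mem_iff_getElem.mp ((hmem y).mpr hyO)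
    have hlt : y.toList.length < x.toList.length := pv_dotSuf_length hsuf
    have hij : iN < jN := by
      rcases lt_trichotomy iN jN with h | h | h
      · exact h
      · exfalso
        have hyx : y = x := by subst h; rw [← hyi, ← hxj]
        rw [hyx] at hlt; omega
      · have := List.pairwise_iff_getElem.mp hpw jN iN hjN hiN h
        rw [hxj, hyi] at this
        simp only [PySem.Str.len] at this
        omega
    refine ⟨(iN : Int), ?_, (jN : Int), ?_, ?_, ?_⟩
    · rw [PySem.List.mem_pyRange_one]; omega
    · rw [PySem.List.mem_pyRange_one]; omega
    · rw [PySem.List.pyGetD_eq_getElem ls "" (by omega) (by omega),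
          PySem.List.pyGetD_eq_getElem ls "" (by omega) (by omega)]
      simp only [Int.toNat_natCast]
      rw [hxj, hyi]
      exact (pv_endswith_iff _ _).mpr hsuf
    · rw [PySem.List.pyGetD_eq_getElem ls "" (by omega) (by omega)]
      simp only [Int.toNat_natCast]
      exact hxj

-- repetition on a Nodup list containing ''
lemma pv_repetition_empty_mem (O : List String) (hO : O.Nodup) (h : "" ∈ O) :
    pvRepetitionA O = [""] := by
  match O, hO, h with
  | [x], _, h =>
    have : x = "" := by simpa using h
    subst this; decide
  | x :: y :: t, hO, h =>
    unfold pvRepetitionA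
    have hlen : (PySem.List.sorted (x :: y :: t) (fun it => PySem.Str.len it) false).length = (x :: y :: t).length :=
      PySem.List.length_sorted _ _ _
    rw [if_neg (by rw [hlen]; simp)]
    obtain ⟨m, t', hls⟩ : ∃ m t', PySem.List.sorted (x :: y :: t) (fun it => PySem.Str.len it) false = m :: t' := by
      rcases he : PySem.List.sorted (x :: y :: t) (fun it => PySem.Str.len it) false with _ | ⟨m, t'⟩
      · rw [he] at hlen; simp at hlen
      · exact ⟨m, t', rfl⟩
    have hm : m = "" := by
      have := PySem.List.key_head_sorted_le (x :: y :: t) (fun it => PySem.Str.len it) hls "" h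
      simp only [PySem.Str.len] at this
      have hnil : ("".toList : List Char) = [] := rfl
      rw [hnil] at this
      simp only [List.length_nil, Nat.cast_zero] at this
      have h0 : m.toList.length = 0 := by omega
      exact String.toList_eq_nil_iff.mp (List.length_eq_zero_iff.mp h0)
    rw [hls, hm, PySem.List.pyGetD_zero_cons]
    rw [if_pos (by rfl)]
    rw [PySem.List.slice_to _ (by omega)]
    rfl

-- repetition on a Nodup list without ''
lemma pv_repetition_no_empty (O : List String) (hO : O.Nodup) (h : "" ∉ O) :
    pvRepetitionA O =
      PySem.List.sorted (O.filter (fun s => !((pvAncestorsB s).any (fun a => PySem.Set.contains O a)))) (fun x => x) false := by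
  have hfilter_self : ∀ (x : String), ((pvAncestorsB x).any (fun a => PySem.Set.contains [x] a)) = false := by
    intro x
    rw [List.any_eq_false]
    intro a ha
    rw [pv_mem_ancestors] at ha
    simp only [PySem.Set.contains, List.contains_cons, List.contains_nil, Bool.or_false, beq_iff_eq]
    intro he
    subst he
    exact absurd (pv_dotSuf_length ha) (by omega)
  match O, hO, h with
  | [], _, _ => decide
  | [x], _, h =>
    show pvRepetitionA [x] = PySem.List.sorted ([x].filter _) (fun x => x) false
    rw [List.filter_eq_self.mpr (by intro s hs; simp only [List.mem_singleton] at hs; subst hs; rw [hfilter_self s]; rfl)]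
    simp [pvRepetitionA, PySem.List.sorted, PySem.List.insertBy]
  | x :: y :: t, hO, h =>
    set O := x :: y :: t with hOdef
    unfold pvRepetitionA
    have hlen : (PySem.List.sorted O (fun it => PySem.Str.len it) false).length = O.length :=
      PySem.List.length_sorted _ _ _
    rw [if_neg (by rw [hlen]; simp [hOdef])]
    obtain ⟨m, t', hls⟩ : ∃ m t', PySem.List.sorted O (fun it => PySem.Str.len it) false = m :: t' := by
      rcases he : PySem.List.sorted O (fun it => PySem.Str.len it) false with _ | ⟨m, t'⟩
      · rw [he] at hlen; simp [hOdef] at hlen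
      · exact ⟨m, t', rfl⟩
    have hmO : m ∈ O := (PySem.List.mem_sorted O _ false m).mp (by rw [hls]; exact List.mem_cons_self)
    have hm : (m == "") = false := beq_eq_false_iff_ne.mpr (fun he => h (he ▸ hmO))
    rw [hls, PySem.List.pyGetD_zero_cons, if_neg (by simp [hm]), ← hls]
    apply PySem.List.sorted_eq_sorted_of_perm _ _ _ (fun a b hab => hab)
    apply (List.perm_ext_iff_of_nodup (PySem.Set.nodup_diff _ _ (PySem.Set.nodup_ofList _)) (hO.filter _)).mpr
    intro z
    rw [PySem.Set.mem_diff, PySem.Set.mem_ofList, PySem.List.mem_sorted, pv_mem_keepFilter]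
    rw [pv_mem_tmp O z]
    constructor
    · rintro ⟨h1, h2⟩; exact ⟨h1, fun hex => h2 ⟨h1, hex⟩⟩
    · rintro ⟨h1, h2⟩; exact ⟨h1, fun hand => h2 hand.2⟩

-- per-fld equality of the two step functions
lemma pv_step_eq (blackSet : List String) (dd wd : PySem.Dict String (List String))
    (st : List String × PySem.Set String) (fld : String) :
    (let origin := PySem.Set.diff (PySem.Set.ofList (dd.getD fld [])) (PySem.Set.ofList (wd.getD fld []))
     let subL := pvRepetitionA origin
     let lst := subL.foldl (fun lst sub =>
       let removed := PySem.Set.diff (PySem.Set.ofList origin) (PySem.Set.ofList subL)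
       let flag := removed.any (fun r =>
         if PySem.Str.len sub > 0 then
           PySem.Str.endswith r ("." ++ sub) && !(blackSet.contains (pvGetDomainA fld r))
         else !(blackSet.contains (pvGetDomainA fld r)))
       let domain := pvGetDomainA fld sub
       if !(blackSet.contains domain) then lst ++ [domain]
       else if flag then lst ++ [domain] else lst) st.1
     let sall := origin.foldl (fun s sub => PySem.Set.add s (pvGetDomainA fld sub)) st.2
     ((lst, sall) : List String × PySem.Set String)) =
    (let origin := PySem.Set.diff (PySem.Set.ofList (dd.getD fld [])) (PySem.Set.ofList (wd.getD fld []))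
     let sall := origin.foldl (fun s sub => PySem.Set.add s (pvMkDomainB fld sub)) st.2
     let lst :=
       if origin.contains "" then
         if !(blackSet.contains fld) ||
            (origin.filter (fun r => r != "")).any (fun r => !(blackSet.contains (pvMkDomainB fld r))) then
           st.1 ++ [fld]
         else st.1
       else
         let keep := PySem.List.sorted
           (origin.filter (fun s => !((pvAncestorsB s).any (fun a => origin.contains a))))
           (fun x => x) false
         let keepset := PySem.Set.ofList keep
         let marked := origin.foldl (fun m r =>
           if !(keepset.contains r) && !(blackSet.contains (pvMkDomainB fld r)) then
             match (pvAncestorsB r).find? (fun a => origin.contains a) with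
             | some a => PySem.Set.add m a
             | none => m
           else m) PySem.Set.empty
         keep.foldl (fun lst sub =>
           let d := pvMkDomainB fld sub
           if !(blackSet.contains d) || marked.contains sub then lst ++ [d] else lst) st.1
     ((lst, sall) : List String × PySem.Set String)) := by
  dsimp only
  rw [pvGetDomainA_eq]
  set O := PySem.Set.diff (PySem.Set.ofList (dd.getD fld [])) (PySem.Set.ofList (wd.getD fld [])) with hOdef
  have hO : O.Nodup := PySem.Set.nodup_diff _ _ (PySem.Set.nodup_ofList _)
  by_cases hmem : "" ∈ O
  · -- '' blocks the fld
    have hrep : pvRepetitionA O = [""] := pv_repetition_empty_mem O hO hmem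
    have hcont : PySem.Set.contains O "" = true := (PySem.Set.contains_iff O "").mpr hmem
    rw [hrep, if_pos hcont, List.foldl_cons, List.foldl_nil]
    have hlen0 : (PySem.Str.len "" > 0) = False := by simp [PySem.Str.len]
    simp only [hlen0, if_false]
    have hdom : pvMkDomainB fld "" = fld := rfl
    rw [hdom]
    have hremoved : (PySem.Set.diff (PySem.Set.ofList O) (PySem.Set.ofList [""])) =
        O.filter (fun r => r != "") := by
      rw [PySem.Set.ofList_eq_self_of_nodup O hO]
      show O.filter _ = O.filter _
      apply List.filter_congr
      intro r _
      show (!PySem.Set.contains (PySem.Set.ofList [""]) r) = (r != "")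
      rw [show (PySem.Set.ofList [""] : List String) = [""] from rfl]
      simp [PySem.Set.contains, bne]
      rfl
    rw [hremoved]
    cases hbf : blackSet.contains fld <;> simp
  · -- no '' : the ancestor path
    have hrep := pv_repetition_no_empty O hO hmem
    have hcont : PySem.Set.contains O "" = false :=
      Bool.eq_false_iff.mpr (fun hc => hmem ((PySem.Set.contains_iff O "").mp hc))
    rw [hrep, if_neg (by rw [hcont]; exact Bool.false_ne_true)]
    set keep := PySem.List.sorted (O.filter (fun s => !((pvAncestorsB s).any (fun a => PySem.Set.contains O a)))) (fun x => x) false with hkeepdef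
    have hkeepnd : keep.Nodup := ((PySem.List.sorted_perm _ _ _).nodup_iff).mpr (hO.filter _)
    have hkeepsub : ∀ z, z ∈ keep ↔ z ∈ O ∧ ¬ ∃ a ∈ O, pvDotSuf a z := fun z => by
      rw [hkeepdef, PySem.List.mem_sorted]
      exact pv_mem_keepFilter O z
    refine congrArg₂ Prod.mk ?_ rfl
    refine PySem.List.foldl_congr_mem _ _ _ _ ?_
    intro acc sub hsub
    dsimp only
    obtain ⟨hsubO, hnoanc⟩ := (hkeepsub sub).mp hsub
    have hsubne : sub ≠ "" := fun he => hmem (he ▸ hsubO)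
    have hsublen : PySem.Str.len sub > 0 := by
      have : sub.toList ≠ [] := fun hc => hsubne (String.toList_eq_nil_iff.mp hc)
      simp only [PySem.Str.len]
      exact_mod_cast List.length_pos_iff.mpr this
    simp only [eq_true hsublen, if_true]
    have hremoved : (PySem.Set.diff (PySem.Set.ofList O) (PySem.Set.ofList keep)) =
        O.filter (fun r => !PySem.Set.contains (PySem.Set.ofList keep) r) := by
      rw [PySem.Set.ofList_eq_self_of_nodup O hO]; rfl
    rw [hremoved]
    have hkeepofList : (PySem.Set.ofList keep : List String) = keep :=
      PySem.Set.ofList_eq_self_of_nodup keep hkeepnd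
    -- the heart: the break-scan flag equals membership in B's marked set
    have hflag : (O.filter (fun r => !PySem.Set.contains (PySem.Set.ofList keep) r)).any (fun r =>
        PySem.Str.endswith r ("." ++ sub) && !(blackSet.contains (pvMkDomainB fld r))) =
        PySem.Set.contains (O.foldl (fun m r =>
          if !(PySem.Set.contains (PySem.Set.ofList keep) r) && !(blackSet.contains (pvMkDomainB fld r)) then
            match (pvAncestorsB r).find? (fun a => PySem.Set.contains O a) with
            | some a => PySem.Set.add m a
            | none => m
          else m) PySem.Set.empty) sub := by
      rw [Bool.eq_iff_iff, List.any_eq_true, PySem.Set.contains_iff,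
        pv_mem_foldl_guard_find O _ _ PySem.Set.empty sub]
      simp only [PySem.Set.empty, List.not_mem_nil, false_or]
      constructor
      · rintro ⟨r, hrmem, hcond⟩
        rw [List.mem_filter] at hrmem
        obtain ⟨hrO, hrnk⟩ := hrmem
        rw [Bool.and_eq_true, Bool.not_eq_true'] at hcond
        obtain ⟨hend, hnb⟩ := hcond
        have hsuf : pvDotSuf sub r := (pv_endswith_iff r sub).mp hend
        refine ⟨r, hrO, by rw [Bool.and_eq_true]; exact ⟨hrnk, by rw [Bool.not_eq_true', hnb]⟩, ?_⟩
        -- find? returns exactly sub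
        have hfsome : (pvAncestorsB r).find? (fun a => PySem.Set.contains O a) ≠ none := fun hnone =>
          (List.find?_eq_none.mp hnone sub ((pv_mem_ancestors r sub).mpr hsuf))
            ((PySem.Set.contains_iff O sub).mpr hsubO)
        obtain ⟨a, ha⟩ := Option.ne_none_iff_exists'.mp hfsome
        obtain ⟨hpa, as, bs, hdecomp, hfail⟩ := List.find?_eq_some_iff_append.mp ha
        have haO : a ∈ O := (PySem.Set.contains_iff O a).mp hpa
        have hamem : a ∈ pvAncestorsB r := by rw [hdecomp]; simp
        have hasuf : pvDotSuf a r := (pv_mem_ancestors r a).mp hamem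
        have haeq : a = sub := by
          rcases lt_trichotomy a.toList.length sub.toList.length with hl | hl | hl
          · exact absurd ⟨a, haO, pv_dotSuf_chain hasuf hsuf hl⟩ hnoanc
          · exact pv_dotSuf_eq_of_length hasuf hsuf hl
          · -- sub would come before a in the shortest-first list and be rejected
            exfalso
            have hsmem : sub ∈ as ++ a :: bs := hdecomp ▸ (pv_mem_ancestors r sub).mpr hsuf
            rcases List.mem_append.mp hsmem with hin | hin
            · have := hfail sub hin
              rw [Bool.not_eq_true', ← Bool.not_eq_true] at this
              exact this ((PySem.Set.contains_iff O sub).mpr hsubO)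
            · rcases List.mem_cons.mp hin with he | hin
              · rw [he] at hl; omega
              · have hpw := pv_anc_pairwise r
                rw [hdecomp] at hpw
                have := (List.pairwise_append.mp hpw).2.1
                rw [List.pairwise_cons] at this
                have := this.1 sub hin
                omega
        rw [haeq] at ha
        exact ha
      · rintro ⟨r, hrO, hguard, hfind⟩
        rw [Bool.and_eq_true, Bool.not_eq_true'] at hguard
        obtain ⟨hrnk, hnb⟩ := hguard
        have hsuf : pvDotSuf sub r :=
          (pv_mem_ancestors r sub).mp (List.mem_of_find?_eq_some hfind)
        refine ⟨r, List.mem_filter.mpr ⟨hrO, by rw [Bool.not_eq_true']; exact hrnk⟩, ?_⟩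
        rw [Bool.and_eq_true]
        exact ⟨(pv_endswith_iff r sub).mpr hsuf, hnb⟩
    rw [hflag]
    cases hbd : blackSet.contains (pvMkDomainB fld sub) <;>
      cases hmk : PySem.Set.contains (O.foldl (fun m r =>
          if !(PySem.Set.contains (PySem.Set.ofList keep) r) && !(blackSet.contains (pvMkDomainB fld r)) then
            match (pvAncestorsB r).find? (fun a => PySem.Set.contains O a) with
            | some a => PySem.Set.add m a
            | none => m
          else m) PySem.Set.empty) sub <;>
      simp

-- ===== VERDICT (by name: the statement is the Claim_ definition above) =====
theorem domainSort_py_spec : Claim_equal_domainSort_py := by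
  intro domainDict blackSet whiteDict _
  unfold Spec_domainSort_py domainSort_py domainSort_py_alt
  exact (PySem.List.foldl_congr_mem _ _ _ _ (fun st fld _ => (pv_step_eq blackSet _ _ st fld).symm)).symm
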